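-- pv_equiv track=rewrite | github.com/jose-cleiton/script_pncp | classificar_gpt_paralelo.py | _calcular_fatias
-- ===== SOURCE A (Python) =====
-- def _calcular_fatias(total: int, n_workers: int) -> list[tuple[int, int]]:
--     """
--     Divide [0, total) em n_workers fatias o mais iguais possível.
--
--     Returns:
--         Lista de (offset, limite) para cada worker.
--     """
--     tamanho_base = total // n_workers
--     resto = total % n_workers
--     fatias = []
--     offset = 0
--     for i in range(n_workers):
--         limite = tamanho_base + (1 if i < resto else 0)
--         if limite > 0:
--             fatias.append((offset, limite))
--         offset += limite
--     return fatias
-- ===== SOURCE B (Python) =====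
-- def _calcular_fatias(total: int, n_workers: int) -> list[tuple[int, int]]:
--     """
--     Divide [0, total) em n_workers fatias o mais iguais possivel.
--     Closed-form offsets: worker i starts at i*base + min(i, resto);
--     no loop-carried accumulator.
--     """
--     base = total // n_workers
--     resto = total % n_workers
--     return [
--         (i * base + min(i, resto), base + (1 if i < resto else 0))
--         for i in range(n_workers)
--         if base + (1 if i < resto else 0) > 0
--     ]
-- ===== Notes on version B (the rewrite author's own statement) =====
-- stated objective: simpler
-- what changed: Replaces the running-offset accumulator loop with a single comprehension whose offsets are computed in closed form (i*base + min(i, resto)), so each slice is independent of previous iterations.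
import Mathlib
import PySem

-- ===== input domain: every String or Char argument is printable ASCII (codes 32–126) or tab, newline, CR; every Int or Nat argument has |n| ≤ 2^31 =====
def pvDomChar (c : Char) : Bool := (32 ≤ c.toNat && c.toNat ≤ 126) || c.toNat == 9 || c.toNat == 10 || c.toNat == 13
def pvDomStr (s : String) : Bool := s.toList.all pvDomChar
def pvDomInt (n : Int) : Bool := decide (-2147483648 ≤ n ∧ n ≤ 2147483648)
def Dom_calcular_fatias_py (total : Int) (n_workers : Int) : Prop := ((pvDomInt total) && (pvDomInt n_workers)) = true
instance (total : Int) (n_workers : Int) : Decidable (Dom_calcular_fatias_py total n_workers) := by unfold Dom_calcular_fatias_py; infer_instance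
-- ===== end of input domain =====

-- B replaces A's running-offset accumulator with closed-form per-worker offsets (i*base + min(i,resto)); objective: simpler.


-- ===== PORT A =====
-- literal transliteration of A: foldl over range(n_workers) carrying (fatias, offset)
def calcular_fatias_py (total : Int) (n_workers : Int) : List (Int × Int) :=
  let tamanho_base := PySem.Int.floordiv total n_workers
  let resto := PySem.Int.mod total n_workers
  let st := (PySem.List.pyRange 0 n_workers 1).foldl
    (fun (st : List (Int × Int) × Int) (i : Int) =>
      let limite := tamanho_base + (if i < resto then 1 else 0)
      ((if limite > 0 then st.1 ++ [(st.2, limite)] else st.1), st.2 + limite))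
    ([], 0)
  st.1

-- ===== PORT B =====
-- literal transliteration of B: comprehension with closed-form offsets, no accumulator
def calcular_fatias_py_alt (total : Int) (n_workers : Int) : List (Int × Int) :=
  let base := PySem.Int.floordiv total n_workers
  let resto := PySem.Int.mod total n_workers
  (PySem.List.pyRange 0 n_workers 1).filterMap
    (fun i =>
      if base + (if i < resto then 1 else 0) > 0 then
        some (i * base + min i resto, base + (if i < resto then 1 else 0))
      else none)

-- ===== PRECONDITION & SPEC =====
-- Pre_ excludes n_workers = 0, where Python's '//' raises ZeroDivisionError (B raises too).
def Pre_calcular_fatias_py (total : Int) (n_workers : Int) : Prop := n_workers ≠ 0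
instance (total : Int) (n_workers : Int) : Decidable (Pre_calcular_fatias_py total n_workers) := by unfold Pre_calcular_fatias_py; infer_instance
def pvWitness_calcular_fatias_py : Int × Int := (10, 3)

def Spec_calcular_fatias_py (total : Int) (n_workers : Int) (out : List (Int × Int)) : Prop := out = calcular_fatias_py_alt total n_workers
instance (total : Int) (n_workers : Int) (out : List (Int × Int)) : Decidable (Spec_calcular_fatias_py total n_workers out) := by unfold Spec_calcular_fatias_py; infer_instance

-- ===== CLAIM (what is proved, stated in full; the proofs are below) =====
def Claim_equal_calcular_fatias_py : Prop := ∀ (total : Int) (n_workers : Int), Dom_calcular_fatias_py total n_workers → Pre_calcular_fatias_py total n_workers → Spec_calcular_fatias_py total n_workers (calcular_fatias_py total n_workers)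

-- ===== LEMMAS AND PROOFS =====

-- A's loop state after processing indices 0..m-1, with the offset characterised in closed form.
theorem fatias_loop_eq (base resto : Int) (hr : 0 ≤ resto) (m : Nat) :
    (PySem.List.pyRange 0 (m : Int) 1).foldl
      (fun (st : List (Int × Int) × Int) (i : Int) =>
        let limite := base + (if i < resto then 1 else 0)
        ((if limite > 0 then st.1 ++ [(st.2, limite)] else st.1), st.2 + limite))
      ([], 0)
    = ((PySem.List.pyRange 0 (m : Int) 1).filterMap
        (fun i =>
          if base + (if i < resto then 1 else 0) > 0 then
            some (i * base + min i resto, base + (if i < resto then 1 else 0))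
          else none),
       (m : Int) * base + min (m : Int) resto) := by
  induction m with
  | zero => simp [PySem.List.pyRange_one_eq_nil, min_eq_left hr]
  | succ m ih =>
    have hsplit : PySem.List.pyRange 0 ((m + 1 : Nat) : Int) 1
        = PySem.List.pyRange 0 (m : Int) 1 ++ [(m : Int)] := by
      push_cast
      exact PySem.List.pyRange_one_succ_right (by positivity)
    rw [hsplit, List.foldl_append, List.filterMap_append, ih]
    simp only [List.foldl_cons, List.foldl_nil, List.filterMap_cons, List.filterMap_nil]
    by_cases h : base + (if (m : Int) < resto then 1 else 0) > 0 <;>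
      simp only [h, if_pos, if_neg, not_false_iff, Prod.mk.injEq] <;>
      refine ⟨by simp, ?_⟩ <;>
      · push_cast
        rw [add_mul, one_mul, min_def, min_def]
        by_cases hm : (m : Int) < resto <;> simp [hm] <;> split_ifs <;> omega

theorem fatias_eq (total n_workers : Int) (hn : n_workers ≠ 0) :
    calcular_fatias_py total n_workers = calcular_fatias_py_alt total n_workers := by
  unfold calcular_fatias_py calcular_fatias_py_alt
  rcases lt_trichotomy n_workers 0 with hneg | hz | hpos
  · rw [PySem.List.pyRange_one_eq_nil (by omega)]
    simp
  · exact absurd hz hn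
  · have hr : 0 ≤ PySem.Int.mod total n_workers := by
      rw [PySem.Int.mod_eq_emod_of_pos hpos]
      exact Int.emod_nonneg total (by omega)
    have hm : ((n_workers.toNat : Nat) : Int) = n_workers := Int.toNat_of_nonneg (le_of_lt hpos)
    have := fatias_loop_eq (PySem.Int.floordiv total n_workers) (PySem.Int.mod total n_workers) hr n_workers.toNat
    rw [hm] at this
    simp only [this]

-- ===== VERDICT (by name: the statement is the Claim_ definition above) =====
theorem calcular_fatias_py_spec : Claim_equal_calcular_fatias_py := by
  intro total n_workers _ hpre
  exact fatias_eq total n_workers hpre
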